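-- pv_equiv track=rewrite | github.com/RamananVr/Leetcodepython | arrays/2757_generate_circular_array_values.py | generateCircularArrayIterative
-- ===== SOURCE A (Python) =====
-- from typing import List
--
-- def generateCircularArrayIterative(n: int, start: int) -> List[int]:
--     """
--     Iterative approach with explicit modulo handling.
--
--     Args:
--         n: Length of array and modulo base
--         start: Starting value
--
--     Returns:
--         Generated circular array
--
--     Time Complexity: O(n)
--     Space Complexity: O(n)
--     """
--     nums = []
--     current = start
--
--     for i in range(n):
--         # Apply modulo to keep value in range [0, n-1]
--         current = current % n
--         nums.append(current)
--
--         # Prepare for next iteration (except the last one)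
--         if i < n - 1:
--             current = current + i + 1
--
--     return nums
-- ===== SOURCE B (Python) =====
-- from typing import List
--
-- def generateCircularArrayIterative(n: int, start: int) -> List[int]:
--     # Closed form: element i is start plus the triangular number i*(i+1)//2, mod n.
--     return [(start + i * (i + 1) // 2) % n for i in range(n)]
-- ===== Notes on version B (the rewrite author's own statement) =====
-- stated objective: simpler
-- what changed: Replaces the stateful loop (running value with per-step modulo and incremental +i+1) by a direct closed form: element i is (start + i*(i+1)//2) % n, computed independently per index in one comprehension.
import Mathlib
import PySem

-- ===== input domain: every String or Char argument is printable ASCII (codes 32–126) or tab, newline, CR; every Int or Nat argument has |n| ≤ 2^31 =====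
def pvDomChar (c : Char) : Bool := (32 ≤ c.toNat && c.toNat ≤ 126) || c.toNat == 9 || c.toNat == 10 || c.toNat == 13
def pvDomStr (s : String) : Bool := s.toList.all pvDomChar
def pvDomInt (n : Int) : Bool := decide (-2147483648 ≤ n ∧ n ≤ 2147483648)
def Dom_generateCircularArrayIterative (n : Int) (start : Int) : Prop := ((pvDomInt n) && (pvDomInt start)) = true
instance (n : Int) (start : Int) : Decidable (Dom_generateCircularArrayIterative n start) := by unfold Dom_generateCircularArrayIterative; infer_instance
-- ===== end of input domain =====

-- B replaces A's stateful loop by a per-index closed form (start + i*(i+1)//2) % n; objective: simpler.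

-- ===== PORT A =====
-- the for-loop: state is (collected values, current); each step reduces current mod n,
-- appends it (here: cons, same resulting list), and, unless i is the last index, adds i+1
def pvLoopA (n : Int) : List Int → Int → List Int
  | [], _ => []
  | i :: rest, current =>
    let c := PySem.Int.mod current n
    c :: pvLoopA n rest (if i < n - 1 then c + i + 1 else c)

def generateCircularArrayIterative (n : Int) (start : Int) : List Int :=
  pvLoopA n (PySem.List.pyRange 0 n 1) start

-- ===== PORT B =====
def generateCircularArrayIterative_alt (n : Int) (start : Int) : List Int :=
  (PySem.List.pyRange 0 n 1).map
    (fun i => PySem.Int.mod (start + PySem.Int.floordiv (i * (i + 1)) 2) n)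

-- ===== PRECONDITION & SPEC =====
def Spec_generateCircularArrayIterative (n : Int) (start : Int) (out : List Int) : Prop := out = generateCircularArrayIterative_alt n start
instance (n : Int) (start : Int) (out : List Int) : Decidable (Spec_generateCircularArrayIterative n start out) := by unfold Spec_generateCircularArrayIterative; infer_instance

-- ===== CLAIM (what is proved, stated in full; the proofs are below) =====
def Claim_equal_generateCircularArrayIterative : Prop := ∀ (n : Int) (start : Int), Dom_generateCircularArrayIterative n start → Spec_generateCircularArrayIterative n start (generateCircularArrayIterative n start)

-- ===== LEMMAS AND PROOFS =====

-- triangular-number step: (a+1)(a+2)//2 = a(a+1)//2 + (a+1)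
theorem pv_tri_step (a : Int) :
    PySem.Int.floordiv ((a + 1) * (a + 1 + 1)) 2 = PySem.Int.floordiv (a * (a + 1)) 2 + (a + 1) := by
  rw [PySem.Int.floordiv_eq_ediv_of_pos (by norm_num : (0:Int) < 2),
      PySem.Int.floordiv_eq_ediv_of_pos (by norm_num : (0:Int) < 2)]
  have h : (a + 1) * (a + 1 + 1) = a * (a + 1) + (a + 1) * 2 := by ring
  rw [h, Int.add_mul_ediv_right _ _ (by norm_num : (2:Int) ≠ 0)]

-- dropping an inner mod under addition: ((c % n) + b) % n = (c + b) % n   (0 < n)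
theorem pv_mod_add (n c b : Int) (hn : 0 < n) :
    PySem.Int.mod (PySem.Int.mod c n + b) n = PySem.Int.mod (c + b) n := by
  rw [PySem.Int.mod_eq_emod_of_pos hn, PySem.Int.mod_eq_emod_of_pos hn,
      PySem.Int.mod_eq_emod_of_pos hn]
  conv_rhs => rw [Int.add_emod]
  rw [Int.add_emod (c % n) b]
  rw [Int.emod_emod_of_dvd _ dvd_rfl]

-- loop invariant: from index a with a current that is congruent to start + tri a,
-- the loop produces the closed-form values for indices a … n-1
theorem pv_loop_eq (n start : Int) : ∀ (m : Nat) (a c : Int), 0 ≤ a → (n - a).toNat = m →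
    PySem.Int.mod c n = PySem.Int.mod (start + PySem.Int.floordiv (a * (a + 1)) 2) n →
    pvLoopA n (PySem.List.pyRange a n 1) c =
      (PySem.List.pyRange a n 1).map
        (fun i => PySem.Int.mod (start + PySem.Int.floordiv (i * (i + 1)) 2) n) := by
  intro m
  induction m with
  | zero =>
    intro a c _ hm _
    rw [PySem.List.pyRange_one_eq_nil (by omega)]
    rfl
  | succ k ih =>
    intro a c ha hm hc
    have hlt : a < n := by omega
    have hn : 0 < n := by omega
    rw [PySem.List.pyRange_one_cons hlt]
    simp only [pvLoopA, List.map_cons]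
    refine congrArg₂ _ hc ?_
    by_cases hlast : a < n - 1
    · rw [if_pos hlast]
      refine ih (a + 1) _ (by omega) (by omega) ?_
      have h2 : start + (PySem.Int.floordiv (a * (a + 1)) 2 + (a + 1))
          = (start + PySem.Int.floordiv (a * (a + 1)) 2) + (a + 1) := by ring
      rw [add_assoc, pv_mod_add n c (a + 1) hn, pv_tri_step, h2,
          ← pv_mod_add n (start + PySem.Int.floordiv (a * (a + 1)) 2) (a + 1) hn, ← hc,
          pv_mod_add n c (a + 1) hn]
    · have : n ≤ a + 1 := by omega
      rw [PySem.List.pyRange_one_eq_nil this]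
      rfl

-- ===== VERDICT (by name: the statement is the Claim_ definition above) =====
theorem generateCircularArrayIterative_spec : Claim_equal_generateCircularArrayIterative := by
  intro n start _
  unfold Spec_generateCircularArrayIterative generateCircularArrayIterative generateCircularArrayIterative_alt
  by_cases hn : 0 < n
  · refine pv_loop_eq n start (n - 0).toNat 0 start (le_refl 0) rfl ?_
    norm_num [PySem.Int.floordiv]
  · rw [PySem.List.pyRange_one_eq_nil (by omega)]
    rfl
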